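-- pv_equiv track=rewrite | github.com/JusticeDAO-LLC/complaint-generator | mediator/claim_support_hooks.py | _normalize_required_support_kinds
-- ===== SOURCE A (Python) =====
-- from typing import Any, Dict, List, Optional
--
-- def _normalize_required_support_kinds(
--
--     required_support_kinds: Optional[List[str]],
-- ) -> List[str]:
--     kinds = required_support_kinds or []
--     normalized = []
--     seen = set()
--     for kind in kinds:
--         normalized_kind = str(kind or '').strip()
--         if not normalized_kind or normalized_kind in seen:
--             continue
--         seen.add(normalized_kind)
--         normalized.append(normalized_kind)
--     return sorted(normalized)
-- ===== SOURCE B (Python) =====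
-- def _normalize_required_support_kinds(required_support_kinds):
--     ys = sorted(k.strip() for k in (required_support_kinds or []) if k.strip())
--     out = []
--     prev = None
--     for v in ys:
--         if v != prev:
--             out.append(v)
--             prev = v
--     return out
-- ===== Notes on version B (the rewrite author's own statement) =====
-- stated objective: alternative
-- what changed: B drops the 'seen' hash set entirely: it strips and filters in one comprehension, sorts that list, and collapses duplicates in a single adjacency pass over the sorted list (prev-comparison) instead of set-membership dedup before sorting.
import Mathlib
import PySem

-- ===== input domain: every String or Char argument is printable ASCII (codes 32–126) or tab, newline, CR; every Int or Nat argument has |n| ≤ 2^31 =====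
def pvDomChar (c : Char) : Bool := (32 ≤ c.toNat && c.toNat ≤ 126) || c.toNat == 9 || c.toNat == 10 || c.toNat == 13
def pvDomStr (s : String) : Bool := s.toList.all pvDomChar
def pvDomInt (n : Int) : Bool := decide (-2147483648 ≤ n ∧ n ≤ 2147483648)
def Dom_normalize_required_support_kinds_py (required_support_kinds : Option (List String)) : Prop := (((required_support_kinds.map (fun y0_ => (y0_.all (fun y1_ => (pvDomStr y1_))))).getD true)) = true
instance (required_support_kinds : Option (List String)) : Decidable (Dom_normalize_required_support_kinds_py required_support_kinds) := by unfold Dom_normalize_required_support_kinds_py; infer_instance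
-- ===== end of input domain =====

-- B removes A's 'seen' hash set: strip+filter, sort, then one adjacency pass (prev-comparison) to collapse duplicates; same cost, different decomposition.


-- ===== PORT A =====
-- loop body of A (helper used by the port and the proofs)
def stepA (acc : List String × PySem.Set String) (kind : String) : List String × PySem.Set String :=
  let nk := PySem.Str.strip (if kind = "" then "" else kind)
  if nk = "" ∨ nk ∈ acc.2 then acc
  else (acc.1 ++ [nk], PySem.Set.add acc.2 nk)

def normalize_required_support_kinds_py (required_support_kinds : Option (List String)) : List String :=
  let kinds := required_support_kinds.getD []
  let st := kinds.foldl stepA ([], PySem.Set.empty)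
  PySem.List.sorted st.1 (fun x => x) false

-- ===== PORT B =====
-- loop body of B (helper used by the port and the proofs)
def stepB (acc : List String × Option String) (v : String) : List String × Option String :=
  if some v = acc.2 then acc else (acc.1 ++ [v], some v)

def normalize_required_support_kinds_py_alt (required_support_kinds : Option (List String)) : List String :=
  let ys := PySem.List.sorted
      (((required_support_kinds.getD []).filter (fun k => decide (PySem.Str.strip k ≠ ""))).map PySem.Str.strip)
      (fun x => x) false
  let st := ys.foldl stepB ([], none)
  st.1

-- ===== PRECONDITION & SPEC =====
def Spec_normalize_required_support_kinds_py (required_support_kinds : Option (List String)) (out : List String) : Prop := out = normalize_required_support_kinds_py_alt required_support_kinds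
instance (required_support_kinds : Option (List String)) (out : List String) : Decidable (Spec_normalize_required_support_kinds_py required_support_kinds out) := by unfold Spec_normalize_required_support_kinds_py; infer_instance

-- ===== CLAIM (what is proved, stated in full; the proofs are below) =====
def Claim_equal_normalize_required_support_kinds_py : Prop := ∀ (required_support_kinds : Option (List String)), Dom_normalize_required_support_kinds_py required_support_kinds → Spec_normalize_required_support_kinds_py required_support_kinds (normalize_required_support_kinds_py required_support_kinds)

-- ===== LEMMAS AND PROOFS =====

-- str(kind or '').strip() = kind.strip() for strings
lemma strip_or_empty (k : String) :
    PySem.Str.strip (if k = "" then "" else k) = PySem.Str.strip k := by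
  split
  · simp_all
  · rfl

-- invariant for A's dedup loop: the accumulated list is nodup and holds exactly
-- the old elements plus the nonempty strips of the processed kinds
lemma loopA_inv (xs : List String) : ∀ (n : List String) (s : PySem.Set String),
    (∀ x, x ∈ s ↔ x ∈ n) → n.Nodup →
    (xs.foldl stepA (n, s)).1.Nodup ∧
    ∀ y, y ∈ (xs.foldl stepA (n, s)).1 ↔
      y ∈ n ∨ ∃ k ∈ xs, PySem.Str.strip k ≠ "" ∧ y = PySem.Str.strip k := by
  induction xs with
  | nil =>
    intro n s hmem hnd
    exact ⟨hnd, by simp⟩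
  | cons x rest ih =>
    intro n s hmem hnd
    simp only [List.foldl_cons, stepA, strip_or_empty]
    by_cases hc : PySem.Str.strip x = "" ∨ PySem.Str.strip x ∈ s
    · rw [if_pos hc]
      obtain ⟨hnd', hm'⟩ := ih n s hmem hnd
      refine ⟨hnd', fun y => ?_⟩
      rw [hm']
      constructor
      · rintro (h | ⟨k, hk, hne, hy⟩)
        · exact Or.inl h
        · exact Or.inr ⟨k, List.mem_cons_of_mem _ hk, hne, hy⟩
      · rintro (h | ⟨k, hk, hne, hy⟩)
        · exact Or.inl h
        · rcases List.mem_cons.mp hk with hk | hk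
          · subst hk
            rcases hc with hc | hc
            · exact absurd hc hne
            · exact Or.inl (by rw [hy]; exact (hmem _).mp hc)
          · exact Or.inr ⟨k, hk, hne, hy⟩
    · rw [if_neg hc]
      push_neg at hc
      obtain ⟨hne, hnotin⟩ := hc
      have hnotn : PySem.Str.strip x ∉ n := fun h => hnotin ((hmem _).mpr h)
      have hmem' : ∀ z, z ∈ PySem.Set.add s (PySem.Str.strip x) ↔ z ∈ n ++ [PySem.Str.strip x] := by
        intro z; rw [PySem.Set.mem_add]; simp [hmem]
      have hnd' : (n ++ [PySem.Str.strip x]).Nodup := by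
        refine List.Nodup.append hnd (List.nodup_singleton _) ?_
        intro a ha hb
        rw [List.mem_singleton] at hb
        subst hb
        exact hnotn ha
      obtain ⟨hr, hm⟩ := ih (n ++ [PySem.Str.strip x]) _ hmem' hnd'
      refine ⟨hr, fun y => ?_⟩
      rw [hm]
      constructor
      · rintro (h | ⟨k, hk, hkne, hy⟩)
        · rcases List.mem_append.mp h with h | h
          · exact Or.inl h
          · exact Or.inr ⟨x, List.mem_cons_self, hne, by simpa using h⟩
        · exact Or.inr ⟨k, List.mem_cons_of_mem _ hk, hkne, hy⟩
      · rintro (h | ⟨k, hk, hkne, hy⟩)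
        · exact Or.inl (List.mem_append.mpr (Or.inl h))
        · rcases List.mem_cons.mp hk with hk | hk
          · subst hk; exact Or.inl (List.mem_append.mpr (Or.inr (by simp [hy])))
          · exact Or.inr ⟨k, hk, hkne, hy⟩

-- invariant for B's adjacency pass over a ≤-sorted list
lemma loopB_inv (s : List String) : ∀ (out : List String) (p : Option String),
    s.Pairwise (· ≤ ·) →
    out.Pairwise (· < ·) →
    (p = none → out = []) →
    (∀ q, p = some q → (∀ x ∈ s, q ≤ x) ∧ q ∈ out ∧ ∀ y ∈ out, y ≤ q) →
    (s.foldl stepB (out, p)).1.Pairwise (· < ·) ∧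
    ∀ y, y ∈ (s.foldl stepB (out, p)).1 ↔ y ∈ out ∨ y ∈ s := by
  induction s with
  | nil =>
    intro out p _ ho _ _
    exact ⟨ho, by simp⟩
  | cons x rest ih =>
    intro out p hs ho hnone hsome
    have hx_le : ∀ z ∈ rest, x ≤ z := (List.pairwise_cons.mp hs).1
    have hrest : rest.Pairwise (· ≤ ·) := (List.pairwise_cons.mp hs).2
    simp only [List.foldl_cons, stepB]
    by_cases hc : some x = p
    · rw [if_pos hc]
      obtain ⟨hq1, hq2, hq3⟩ := hsome x hc.symm
      obtain ⟨hr, hm⟩ := ih out p hrest ho hnone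
        (fun q hq => by
          have hqx : q = x := by rw [hq] at hc; exact (Option.some.inj hc).symm
          subst hqx
          exact ⟨hx_le, hq2, hq3⟩)
      refine ⟨hr, fun y => ?_⟩
      rw [hm]
      constructor
      · rintro (h | h)
        · exact Or.inl h
        · exact Or.inr (List.mem_cons_of_mem _ h)
      · rintro (h | h)
        · exact Or.inl h
        · rcases List.mem_cons.mp h with h | h
          · exact Or.inl (h ▸ hq2)
          · exact Or.inr h
    · rw [if_neg hc]
      have hlt : ∀ y ∈ out, y < x := by
        intro y hy
        cases p with
        | none => simp [hnone rfl] at hy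
        | some q =>
          obtain ⟨hq1, hq2, hq3⟩ := hsome q rfl
          have hqx : q ≤ x := hq1 x List.mem_cons_self
          have hqne : q ≠ x := fun h => hc (by rw [h])
          exact lt_of_le_of_lt (hq3 y hy) (lt_of_le_of_ne hqx hqne)
      have ho' : (out ++ [x]).Pairwise (· < ·) :=
        List.pairwise_append.mpr ⟨ho, List.pairwise_singleton _ _,
          fun a ha b hb => by
            rw [List.mem_singleton] at hb; subst hb; exact hlt a ha⟩
      obtain ⟨hr, hm⟩ := ih (out ++ [x]) (some x) hrest ho' (by simp)
        (fun q hq => by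
          have hqx : q = x := (Option.some.inj hq).symm
          subst hqx
          refine ⟨hx_le, List.mem_append.mpr (Or.inr (by simp)), fun y hy => ?_⟩
          rcases List.mem_append.mp hy with h | h
          · exact le_of_lt (hlt y h)
          · rw [List.mem_singleton] at h; subst h; exact le_refl _)
      refine ⟨hr, fun y => ?_⟩
      rw [hm]
      simp only [List.mem_append, List.mem_cons]
      tauto

-- ===== VERDICT (by name: the statement is the Claim_ definition above) =====
theorem normalize_required_support_kinds_py_spec : Claim_equal_normalize_required_support_kinds_py := by
  intro ks _
  unfold Spec_normalize_required_support_kinds_py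
  unfold normalize_required_support_kinds_py normalize_required_support_kinds_py_alt
  dsimp only
  set kinds := ks.getD [] with hk
  obtain ⟨hAnd, hAmem⟩ := loopA_inv kinds [] PySem.Set.empty (by simp [PySem.Set.empty]) (by simp)
  set nA := (kinds.foldl stepA ([], PySem.Set.empty)).1 with hnA
  set ys := PySem.List.sorted ((kinds.filter (fun k => decide (PySem.Str.strip k ≠ ""))).map PySem.Str.strip)
      (fun x => x) false with hys
  have hys_pw : ys.Pairwise (· ≤ ·) :=
    PySem.List.sorted_pairwise ((kinds.filter (fun k => decide (PySem.Str.strip k ≠ ""))).map PySem.Str.strip) (fun x => x)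
  obtain ⟨hBpw, hBmem⟩ := loopB_inv ys [] none hys_pw (by simp) (fun _ => rfl) (by simp)
  set r := (ys.foldl stepB ([], none)).1 with hr
  have hmem_eq : ∀ y, y ∈ r ↔ y ∈ nA := by
    intro y
    rw [hBmem, hAmem]
    simp only [List.not_mem_nil, false_or]
    rw [hys, PySem.List.mem_sorted]
    simp only [List.mem_map, List.mem_filter, decide_eq_true_eq]
    constructor
    · rintro ⟨k, ⟨hk, hne⟩, hy⟩; exact ⟨k, hk, hne, hy.symm⟩
    · rintro ⟨k, hk, hne, hy⟩; exact ⟨k, ⟨hk, hne⟩, hy.symm⟩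
  have hrnd : r.Nodup := hBpw.imp (fun h => ne_of_lt h)
  have hperm : r.Perm nA := (List.perm_ext_iff_of_nodup hrnd hAnd).mpr hmem_eq
  exact PySem.List.sorted_eq_of_perm_of_pairwise_lt nA r (fun x => x) hperm hBpw
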